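-- pv_equiv track=rewrite | github.com/kou1127h/paiza | B/051_B.py | appendSum
-- ===== SOURCE A (Python) =====
-- def colSum(c, N, array):
--     ans = 0
--     for i in range(N):
--         ans += array[i][c]
--     return ans
--
-- def exSum(N, array):
--     ans1 = 0
--     ans2 = 0
--     for i in range(N):
--         ans1 += array[i][N - 1 - i]
--     for i in range(N):
--         ans2 += array[i][i]
--     return [ans1, ans2]
--
-- def appendSum(sums, mahoujin, N):
--     for i in range(N):
--         sums.append(sum(mahoujin[i]))
--
--     for i in range(N):
--         sums.append(colSum(i, N, mahoujin))
--
--     sums.append(exSum(N, mahoujin)[0])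
--     sums.append(exSum(N, mahoujin)[1])
--     return sums
-- ===== SOURCE B (Python) =====
-- def appendSum(sums, mahoujin, N):
--     # Single combined traversal: one pass over the rows builds the row sums,
--     # a running column-sum table and both diagonal sums at once.
--     # Like A, this appends to the caller's `sums` list in place.
--     col = [0] * N
--     diag_main = 0
--     diag_anti = 0
--     rows = []
--     for i in range(N):
--         row = mahoujin[i]
--         rows.append(sum(row))
--         col = [c + v for c, v in zip(col, row)]
--         diag_main += row[i]
--         diag_anti += row[N - 1 - i]
--     sums.extend(rows)
--     sums.extend(col)
--     sums.append(diag_anti)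
--     sums.append(diag_main)
--     return sums
-- ===== Notes on version B (the rewrite author's own statement) =====
-- stated objective: alternative
-- what changed: A makes N separate column scans (colSum per column) and computes exSum twice with two diagonal passes; B does one combined row-major pass maintaining a column-sum table and both diagonal accumulators, then appends everything in A's order.
import Mathlib
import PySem

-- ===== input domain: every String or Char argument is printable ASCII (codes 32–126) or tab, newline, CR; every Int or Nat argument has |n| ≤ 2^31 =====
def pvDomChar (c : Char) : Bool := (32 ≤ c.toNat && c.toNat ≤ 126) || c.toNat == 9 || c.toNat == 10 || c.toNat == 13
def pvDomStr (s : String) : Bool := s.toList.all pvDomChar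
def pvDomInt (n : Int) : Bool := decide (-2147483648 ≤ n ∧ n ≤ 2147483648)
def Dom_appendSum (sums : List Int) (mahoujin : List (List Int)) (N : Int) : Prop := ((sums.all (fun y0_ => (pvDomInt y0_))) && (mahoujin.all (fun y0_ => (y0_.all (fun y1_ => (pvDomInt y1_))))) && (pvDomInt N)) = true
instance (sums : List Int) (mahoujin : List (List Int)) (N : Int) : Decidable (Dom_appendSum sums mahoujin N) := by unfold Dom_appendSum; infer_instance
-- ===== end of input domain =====

-- B replaces A's N per-column scans and double exSum computation by one combined
-- row-major pass with a column-sum table and both diagonal accumulators.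
-- Both A and B append to the caller's `sums` list in place; the claim is about the return value.

-- ===== PORT A =====
def colSum (c : Int) (N : Int) (array : List (List Int)) : Int :=
  (PySem.List.pyRange 0 N 1).foldl
    (fun ans i => ans + PySem.List.pyGetD (PySem.List.pyGetD array i []) c 0) 0

def exSum (N : Int) (array : List (List Int)) : List Int :=
  let ans1 := (PySem.List.pyRange 0 N 1).foldl
    (fun a i => a + PySem.List.pyGetD (PySem.List.pyGetD array i []) (N - 1 - i) 0) 0
  let ans2 := (PySem.List.pyRange 0 N 1).foldl
    (fun a i => a + PySem.List.pyGetD (PySem.List.pyGetD array i []) i 0) 0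
  [ans1, ans2]

-- out-of-range accesses (excluded by Pre_appendSum, where Python raises IndexError) read a default
def appendSum (sums : List Int) (mahoujin : List (List Int)) (N : Int) : List Int :=
  let s1 := (PySem.List.pyRange 0 N 1).foldl
    (fun s i => s ++ [(PySem.List.pyGetD mahoujin i []).sum]) sums
  let s2 := (PySem.List.pyRange 0 N 1).foldl
    (fun s i => s ++ [colSum i N mahoujin]) s1
  let s3 := s2 ++ [PySem.List.pyGetD (exSum N mahoujin) 0 0]
  s3 ++ [PySem.List.pyGetD (exSum N mahoujin) 1 0]

-- ===== PORT B =====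
def appendSum_alt (sums : List Int) (mahoujin : List (List Int)) (N : Int) : List Int :=
  let st := (PySem.List.pyRange 0 N 1).foldl
    (fun (st : List Int × List Int × Int × Int) i =>
      let row := PySem.List.pyGetD mahoujin i []
      (st.1 ++ [row.sum],
       List.zipWith (· + ·) st.2.1 row,
       st.2.2.1 + PySem.List.pyGetD row i 0,
       st.2.2.2 + PySem.List.pyGetD row (N - 1 - i) 0))
    ([], List.replicate N.toNat 0, 0, 0)
  sums ++ st.1 ++ st.2.1 ++ [st.2.2.2, st.2.2.1]

-- ===== PRECONDITION & SPEC =====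
-- Pre_ excludes exactly the inputs where Python A raises IndexError: some row index
-- i < N has no row of at least N entries (this also forces N ≤ len(mahoujin) for N ≥ 1).
def Pre_appendSum (sums : List Int) (mahoujin : List (List Int)) (N : Int) : Prop :=
  N ≤ (mahoujin.length : Int) ∧ ∀ r ∈ mahoujin.take N.toNat, N ≤ (r.length : Int)
instance (sums : List Int) (mahoujin : List (List Int)) (N : Int) : Decidable (Pre_appendSum sums mahoujin N) := by unfold Pre_appendSum; infer_instance

def pvWitness_appendSum : List Int × List (List Int) × Int := ([7], [[1, 2], [3, 4]], 2)

def Spec_appendSum (sums : List Int) (mahoujin : List (List Int)) (N : Int) (out : List Int) : Prop := out = appendSum_alt sums mahoujin N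
instance (sums : List Int) (mahoujin : List (List Int)) (N : Int) (out : List Int) : Decidable (Spec_appendSum sums mahoujin N out) := by unfold Spec_appendSum; infer_instance

-- ===== CLAIM (what is proved, stated in full; the proofs are below) =====
def Claim_equal_appendSum : Prop := ∀ (sums : List Int) (mahoujin : List (List Int)) (N : Int), Dom_appendSum sums mahoujin N → Pre_appendSum sums mahoujin N → Spec_appendSum sums mahoujin N (appendSum sums mahoujin N)

-- ===== LEMMAS AND PROOFS =====

-- row i of the matrix as both ports read it
def rowAt (mahoujin : List (List Int)) (i : Nat) : List Int :=
  PySem.List.pyGetD mahoujin (↑i) []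

-- partial column sum: column j over the first k rows
def colPart (mahoujin : List (List Int)) (j k : Nat) : Int :=
  (List.range k).foldl (fun a i => a + PySem.List.pyGetD (rowAt mahoujin i) (↑j) 0) 0

def diagM (mahoujin : List (List Int)) (k : Nat) : Int :=
  (List.range k).foldl (fun a i => a + PySem.List.pyGetD (rowAt mahoujin i) (↑i) 0) 0

def diagA (mahoujin : List (List Int)) (N : Int) (k : Nat) : Int :=
  (List.range k).foldl (fun a i => a + PySem.List.pyGetD (rowAt mahoujin i) (N - 1 - ↑i) 0) 0

lemma pyRange0 (N : Int) :
    PySem.List.pyRange 0 N 1 = (List.range N.toNat).map (fun (k : Nat) => (k : Int)) := by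
  rw [PySem.List.pyRange_one]
  simp only [Int.sub_zero, zero_add]

lemma bfold (mahoujin : List (List Int)) (N : Int)
    (hrow : ∀ i : Nat, i < N.toNat → N ≤ ((rowAt mahoujin i).length : Int))
    (k : Nat) (hk : k ≤ N.toNat) :
    (List.range k).foldl
      (fun (st : List Int × List Int × Int × Int) (i : Nat) =>
        (st.1 ++ [(PySem.List.pyGetD mahoujin (↑i) []).sum],
         List.zipWith (· + ·) st.2.1 (PySem.List.pyGetD mahoujin (↑i) []),
         st.2.2.1 + PySem.List.pyGetD (PySem.List.pyGetD mahoujin (↑i) []) (↑i) 0,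
         st.2.2.2 + PySem.List.pyGetD (PySem.List.pyGetD mahoujin (↑i) []) (N - 1 - ↑i) 0))
      ([], List.replicate N.toNat 0, 0, 0)
    = ((List.range k).map (fun i => (rowAt mahoujin i).sum),
       (List.range N.toNat).map (fun j => colPart mahoujin j k),
       diagM mahoujin k,
       diagA mahoujin N k) := by
  induction k with
  | zero =>
      simp [colPart, diagM, diagA, List.map_const']
  | succ k ih =>
      have hk' : k ≤ N.toNat := Nat.le_of_succ_le hk
      have hkM : k < N.toNat := hk
      rw [List.range_succ, List.foldl_append, ih hk', List.map_append, List.foldl_cons,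
        List.foldl_nil]
      have hlen : N.toNat ≤ (rowAt mahoujin k).length := by
        have := hrow k hkM
        omega
      have hcol : List.zipWith (· + ·)
          ((List.range N.toNat).map (fun j => colPart mahoujin j k))
          (PySem.List.pyGetD mahoujin (↑k) []) =
          (List.range N.toNat).map (fun j => colPart mahoujin j (k + 1)) := by
        apply List.ext_getElem
        · simp [rowAt] at hlen ⊢
          omega
        · intro j h1 h2
          have hj : j < N.toNat := by simpa using h2
          have hjlen : j < (rowAt mahoujin k).length := lt_of_lt_of_le hj hlen
          simp only [List.getElem_zipWith, List.getElem_map, List.getElem_range]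
          show colPart mahoujin j k + (rowAt mahoujin k)[j] = colPart mahoujin j (k + 1)
          simp only [colPart, List.range_succ, List.foldl_append, List.foldl_cons,
            List.foldl_nil, PySem.List.pyGetD_natCast, List.getD_eq_getElem _ _ hjlen]
      refine Prod.ext ?_ (Prod.ext hcol (Prod.ext ?_ ?_)) <;>
        simp [rowAt, diagM, diagA, List.range_succ]

lemma colSum_eq (mahoujin : List (List Int)) (N : Int) (j : Nat) :
    colSum (↑j) N mahoujin = colPart mahoujin j N.toNat := by
  rw [colSum, colPart, pyRange0, List.foldl_map]
  rfl

lemma appendSum_eq (sums : List Int) (mahoujin : List (List Int)) (N : Int) :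
    appendSum sums mahoujin N =
      sums ++ (List.range N.toNat).map (fun i => (rowAt mahoujin i).sum)
           ++ (List.range N.toNat).map (fun j => colPart mahoujin j N.toNat)
           ++ [diagA mahoujin N N.toNat, diagM mahoujin N.toNat] := by
  rw [appendSum]
  simp only [pyRange0, List.foldl_map, PySem.List.foldl_append_singleton_eq_map]
  have hex : exSum N mahoujin = [diagA mahoujin N N.toNat, diagM mahoujin N.toNat] := by
    rw [exSum, diagA, diagM, pyRange0, List.foldl_map, List.foldl_map]
    simp only [rowAt]
  rw [hex]
  simp only [colSum_eq]
  simp [rowAt, PySem.List.pyGetD, List.append_assoc]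

lemma appendSum_alt_eq (sums : List Int) (mahoujin : List (List Int)) (N : Int)
    (hrow : ∀ i : Nat, i < N.toNat → N ≤ ((rowAt mahoujin i).length : Int)) :
    appendSum_alt sums mahoujin N =
      sums ++ (List.range N.toNat).map (fun i => (rowAt mahoujin i).sum)
           ++ (List.range N.toNat).map (fun j => colPart mahoujin j N.toNat)
           ++ [diagA mahoujin N N.toNat, diagM mahoujin N.toNat] := by
  rw [appendSum_alt]
  simp only [pyRange0, List.foldl_map]
  rw [bfold mahoujin N hrow N.toNat (le_refl _)]

-- ===== VERDICT (by name: the statement is the Claim_ definition above) =====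
theorem appendSum_spec : Claim_equal_appendSum := by
  intro sums mahoujin N _ hpre
  have hrow : ∀ i : Nat, i < N.toNat → N ≤ ((rowAt mahoujin i).length : Int) := by
    intro i hi
    have h1 := hpre.1
    have hlen : i < mahoujin.length := by omega
    have hmem : mahoujin[i] ∈ mahoujin.take N.toNat := by
      have hi' : i < (mahoujin.take N.toNat).length := by
        simp only [List.length_take]
        omega
      have : (mahoujin.take N.toNat)[i] = mahoujin[i] := List.getElem_take
      exact this ▸ List.getElem_mem hi'
    have := hpre.2 _ hmem
    simpa [rowAt, PySem.List.pyGetD_natCast, List.getD_eq_getElem, List.getElem?_eq_getElem hlen] using this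
  show appendSum sums mahoujin N = appendSum_alt sums mahoujin N
  rw [appendSum_eq, appendSum_alt_eq sums mahoujin N hrow]
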